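-- pv_equiv track=rewrite | github.com/JustSmithWare/LargeRasterOR | logger.py | get_logging_key
-- ===== SOURCE A (Python) =====
-- def get_logging_key(hyperparams: dict) -> str:
--     '''
--     Creates a descriptive name for a given model given its hyperparameters.
--
--     Parameters:
--     - hyperparams (dict): Dictionary of hyperpameters that will be used to generate a name.
--
--     Returns:
--     - str: Descriptive model name made from the provided hyperparameters.
--
--     '''
--     logging_key_parts = []
--
--     key_to_abbreviation = {
--         'patch_size': 'patch',
--         'n_epochs': 'epochs',
--         'sample_size': 'sample'
--     }
--
--     # Iterate through the abbreviation-key mappings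
--     for key, abbreviation in key_to_abbreviation.items():
--         # If the key exists in hyperparams, append its abbreviation and value to logging_key_parts
--         if key in hyperparams:
--             logging_key_parts.append(f"{abbreviation}_{hyperparams[key]}")
--
--     # Handle any additional keys that were not anticipated
--     for key in hyperparams.keys():
--         if key not in key_to_abbreviation:
--             logging_key_parts.append(f"{key}_{hyperparams[key]}")
--
--     # Join all parts to form the final logging key
--     logging_key = '_'.join(logging_key_parts)
--
--     return logging_key
-- ===== SOURCE B (Python) =====
-- def get_logging_key(hyperparams: dict) -> str:
--     labels = {'patch_size': 'patch', 'n_epochs': 'epochs', 'sample_size': 'sample'}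
--     rank = {k: i for i, k in enumerate(labels)}
--     keys = sorted(hyperparams, key=lambda k: rank.get(k, 3))
--     return '_'.join(f"{labels.get(k, k)}_{hyperparams[k]}" for k in keys)
-- ===== Notes on version B (the rewrite author's own statement) =====
-- stated objective: alternative
-- what changed: Replaced A's two separate filtered passes (fixed abbreviation loop, then unknown-key loop) by one stable sort of the dict's keys under a rank (known keys 0/1/2, unknown keys 3) followed by a single map-and-join comprehension.
import Mathlib
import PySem

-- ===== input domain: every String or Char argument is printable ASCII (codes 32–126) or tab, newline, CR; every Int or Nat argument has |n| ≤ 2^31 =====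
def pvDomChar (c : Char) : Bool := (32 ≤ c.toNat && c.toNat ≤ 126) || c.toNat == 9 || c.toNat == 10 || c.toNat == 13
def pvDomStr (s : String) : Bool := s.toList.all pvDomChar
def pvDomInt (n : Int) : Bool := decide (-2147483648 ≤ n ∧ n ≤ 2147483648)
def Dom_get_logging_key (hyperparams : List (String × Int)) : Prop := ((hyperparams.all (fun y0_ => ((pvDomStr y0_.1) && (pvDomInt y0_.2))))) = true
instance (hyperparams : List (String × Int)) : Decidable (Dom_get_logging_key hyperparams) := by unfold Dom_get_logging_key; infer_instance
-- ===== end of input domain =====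

-- B replaces A's two filtered passes (fixed abbreviation loop, then unknown-key loop) by one
-- stable sort of the keys under a rank (known keys 0/1/2, unknown keys 3) followed by a single
-- map-and-join pass; same cost class, different decomposition (objective: alternative).

-- ===== PORT A =====
-- key_to_abbreviation as an (ordered) association list, as in A's dict literal
def pvAbbrevDictA : PySem.Dict String String :=
  PySem.Dict.ofList [("patch_size", "patch"), ("n_epochs", "epochs"), ("sample_size", "sample")]

def get_logging_key (hyperparams : List (String × Int)) : String :=
  let d := PySem.Dict.ofList hyperparams
  -- for key, abbreviation in key_to_abbreviation.items(): if key in hyperparams: append f"{abbreviation}_{hyperparams[key]}"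
  let parts1 := pvAbbrevDictA.items.foldl
    (fun acc p =>
      if d.contains p.1 then acc ++ [PySem.Str.join "_" [p.2, PySem.Int.toStr (d.getD p.1 0)]]
      else acc) []
  -- for key in hyperparams.keys(): if key not in key_to_abbreviation: append f"{key}_{hyperparams[key]}"
  let parts := d.keys.foldl
    (fun acc k =>
      if !(pvAbbrevDictA.contains k) then acc ++ [PySem.Str.join "_" [k, PySem.Int.toStr (d.getD k 0)]]
      else acc) parts1
  PySem.Str.join "_" parts

-- ===== PORT B =====
def pvLabelsB : PySem.Dict String String :=
  PySem.Dict.ofList [("patch_size", "patch"), ("n_epochs", "epochs"), ("sample_size", "sample")]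

-- rank = {k: i for i, k in enumerate(labels)}
def pvRankB : PySem.Dict String Int :=
  PySem.Dict.ofList ((PySem.List.enumerate pvLabelsB.keys).map (fun p => (p.2, p.1)))

def get_logging_key_alt (hyperparams : List (String × Int)) : String :=
  let d := PySem.Dict.ofList hyperparams
  -- keys = sorted(hyperparams, key=lambda k: rank.get(k, 3))
  let keys := PySem.List.sorted d.keys (fun k => pvRankB.getD k 3)
  -- '_'.join(f"{labels.get(k, k)}_{hyperparams[k]}" for k in keys)
  PySem.Str.join "_"
    (keys.map (fun k => PySem.Str.join "_" [pvLabelsB.getD k k, PySem.Int.toStr (d.getD k 0)]))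

-- ===== PRECONDITION & SPEC =====
def Spec_get_logging_key (hyperparams : List (String × Int)) (out : String) : Prop := out = get_logging_key_alt hyperparams
instance (hyperparams : List (String × Int)) (out : String) : Decidable (Spec_get_logging_key hyperparams out) := by unfold Spec_get_logging_key; infer_instance

-- ===== CLAIM (what is proved, stated in full; the proofs are below) =====
def Claim_equal_get_logging_key : Prop := ∀ (hyperparams : List (String × Int)), Dom_get_logging_key hyperparams → Spec_get_logging_key hyperparams (get_logging_key hyperparams)

-- ===== LEMMAS AND PROOFS =====

-- insertBy passes over a block it is not 'before'
theorem pv_insertBy_append_left {α : Type} (before : α → α → Bool) (x : α) (l r : List α)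
    (h : ∀ y ∈ l, before x y = false) :
    PySem.List.insertBy before x (l ++ r) = l ++ PySem.List.insertBy before x r := by
  induction l with
  | nil => simp
  | cons y t ih =>
    have hy : before x y = false := h y (by simp)
    simp [PySem.List.insertBy, hy, ih (fun z hz => h z (by simp [hz]))]

theorem pv_insertBy_eq_append_cons {α : Type} (before : α → α → Bool) (x : α) (l r : List α)
    (hle : ∀ y ∈ l, before x y = false) (hgt : ∀ y ∈ r, before x y = true) :
    PySem.List.insertBy before x (l ++ r) = l ++ [x] ++ r := by
  rw [pv_insertBy_append_left before x l r hle]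
  cases r with
  | nil => simp [PySem.List.insertBy]
  | cons y t => simp [PySem.List.insertBy, hgt y (by simp)]

-- a stable sort under a key taking values in {0,1,2,3} is the concatenation of the four buckets
theorem pv_sorted_buckets {α : Type} (key : α → Int)
    (hk : ∀ x : α, key x = 0 ∨ key x = 1 ∨ key x = 2 ∨ key x = 3) (xs : List α) :
    PySem.List.sorted xs key =
      xs.filter (fun x => key x == 0) ++ xs.filter (fun x => key x == 1) ++
      xs.filter (fun x => key x == 2) ++ xs.filter (fun x => key x == 3) := by
  rw [PySem.List.sorted_eq_foldl_insertBy]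
  suffices H : ∀ (xs : List α) (A0 A1 A2 A3 : List α),
      (∀ y ∈ A0, key y = 0) → (∀ y ∈ A1, key y = 1) → (∀ y ∈ A2, key y = 2) → (∀ y ∈ A3, key y = 3) →
      xs.foldl (fun acc x => PySem.List.insertBy (fun a b => decide (key a < key b)) x acc)
        (A0 ++ A1 ++ A2 ++ A3)
        = (A0 ++ xs.filter (fun x => key x == 0)) ++ (A1 ++ xs.filter (fun x => key x == 1)) ++
          (A2 ++ xs.filter (fun x => key x == 2)) ++ (A3 ++ xs.filter (fun x => key x == 3)) by
    simpa using H xs [] [] [] [] (by simp) (by simp) (by simp) (by simp)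
  intro xs
  induction xs with
  | nil => intro A0 A1 A2 A3 _ _ _ _; simp
  | cons x t ih =>
    intro A0 A1 A2 A3 h0 h1 h2 h3
    have hins : PySem.List.insertBy (fun a b => decide (key a < key b)) x (A0 ++ A1 ++ A2 ++ A3)
        = (if key x = 0 then (A0 ++ [x]) else A0) ++ (if key x = 1 then (A1 ++ [x]) else A1) ++
          (if key x = 2 then (A2 ++ [x]) else A2) ++ (if key x = 3 then (A3 ++ [x]) else A3) := by
      rcases hk x with h | h | h | h
      · have heq := pv_insertBy_eq_append_cons (fun a b => decide (key a < key b)) x A0 (A1 ++ A2 ++ A3)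
          (by intro y hy; simp [h, h0 y hy])
          (by intro y hy; simp only [List.mem_append] at hy
              rcases hy with (hy | hy) | hy
              · simp [h, h1 y hy]
              · simp [h, h2 y hy]
              · simp [h, h3 y hy])
        rw [show A0 ++ A1 ++ A2 ++ A3 = A0 ++ (A1 ++ A2 ++ A3) by simp, heq]
        simp [h]
      · have heq := pv_insertBy_eq_append_cons (fun a b => decide (key a < key b)) x (A0 ++ A1) (A2 ++ A3)
          (by intro y hy; simp only [List.mem_append] at hy
              rcases hy with hy | hy
              · simp [h, h0 y hy]
              · simp [h, h1 y hy])
          (by intro y hy; simp only [List.mem_append] at hy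
              rcases hy with hy | hy
              · simp [h, h2 y hy]
              · simp [h, h3 y hy])
        rw [show A0 ++ A1 ++ A2 ++ A3 = (A0 ++ A1) ++ (A2 ++ A3) by simp, heq]
        simp [h]
      · have heq := pv_insertBy_eq_append_cons (fun a b => decide (key a < key b)) x (A0 ++ A1 ++ A2) A3
          (by intro y hy; simp only [List.mem_append] at hy
              rcases hy with (hy | hy) | hy
              · simp [h, h0 y hy]
              · simp [h, h1 y hy]
              · simp [h, h2 y hy])
          (by intro y hy; simp [h, h3 y hy])
        rw [heq]
        simp [h]
      · have heq := pv_insertBy_eq_append_cons (fun a b => decide (key a < key b)) x (A0 ++ A1 ++ A2 ++ A3) []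
          (by intro y hy; simp only [List.mem_append] at hy
              rcases hy with ((hy | hy) | hy) | hy
              · simp [h, h0 y hy]
              · simp [h, h1 y hy]
              · simp [h, h2 y hy]
              · simp [h, h3 y hy])
          (by simp)
        rw [show A0 ++ A1 ++ A2 ++ A3 ++ ([] : List α) = A0 ++ A1 ++ A2 ++ A3 by simp] at heq
        rw [heq]
        simp [h]
    rw [List.foldl_cons, hins,
      ih _ _ _ _
        (by intro y hy; split_ifs at hy with hx
            · rcases List.mem_append.1 hy with hy | hy
              · exact h0 y hy
              · simp at hy; simpa [hy]
            · exact h0 y hy)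
        (by intro y hy; split_ifs at hy with hx
            · rcases List.mem_append.1 hy with hy | hy
              · exact h1 y hy
              · simp at hy; simpa [hy]
            · exact h1 y hy)
        (by intro y hy; split_ifs at hy with hx
            · rcases List.mem_append.1 hy with hy | hy
              · exact h2 y hy
              · simp at hy; simpa [hy]
            · exact h2 y hy)
        (by intro y hy; split_ifs at hy with hx
            · rcases List.mem_append.1 hy with hy | hy
              · exact h3 y hy
              · simp at hy; simpa [hy]
            · exact h3 y hy)]
    rcases hk x with h | h | h | h <;> simp [h]

-- the rank B sorts by, in closed form
theorem pv_rank_eq (k : String) :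
    pvRankB.getD k 3 =
      if k = "patch_size" then 0 else if k = "n_epochs" then 1 else if k = "sample_size" then 2 else 3 := by
  by_cases h1 : k = "patch_size"
  · subst h1; decide
  by_cases h2 : k = "n_epochs"
  · subst h2; decide
  by_cases h3 : k = "sample_size"
  · subst h3; decide
  rw [show pvRankB = PySem.Dict.mk [("patch_size", (0 : Int)), ("n_epochs", 1), ("sample_size", 2)] from by decide]
  simp [PySem.Dict.getD_eq_get?_getD, PySem.Dict.get?, Ne.symm h1, Ne.symm h2, Ne.symm h3, h1, h2, h3]

-- B's label in closed form
theorem pv_label_eq (k : String) :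
    pvLabelsB.getD k k =
      if k = "patch_size" then "patch" else if k = "n_epochs" then "epochs"
      else if k = "sample_size" then "sample" else k := by
  by_cases h1 : k = "patch_size"
  · subst h1; decide
  by_cases h2 : k = "n_epochs"
  · subst h2; decide
  by_cases h3 : k = "sample_size"
  · subst h3; decide
  rw [show pvLabelsB = PySem.Dict.mk [("patch_size", "patch"), ("n_epochs", "epochs"), ("sample_size", "sample")] from by decide]
  simp [PySem.Dict.getD_eq_get?_getD, PySem.Dict.get?, Ne.symm h1, Ne.symm h2, Ne.symm h3, h1, h2, h3]

theorem pv_abbrevA_contains (k : String) :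
    pvAbbrevDictA.contains k =
      (k == "patch_size" || k == "n_epochs" || k == "sample_size") := by
  by_cases h1 : k = "patch_size"
  · subst h1; decide
  by_cases h2 : k = "n_epochs"
  · subst h2; decide
  by_cases h3 : k = "sample_size"
  · subst h3; decide
  rw [show pvAbbrevDictA = PySem.Dict.mk [("patch_size", "patch"), ("n_epochs", "epochs"), ("sample_size", "sample")] from by decide]
  simp [PySem.Dict.contains]
  rw [beq_eq_false_iff_ne.mpr (Ne.symm h1), beq_eq_false_iff_ne.mpr (Ne.symm h2),
    beq_eq_false_iff_ne.mpr (Ne.symm h3), beq_eq_false_iff_ne.mpr h1,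
    beq_eq_false_iff_ne.mpr h2, beq_eq_false_iff_ne.mpr h3]
  simp

-- with no duplicates, filtering a list for one element either yields [that element] or nothing
theorem pv_filter_single {α : Type} [DecidableEq α] (l : List α) (hnd : l.Nodup) (a : α) :
    l.filter (fun x => x == a) = if a ∈ l then [a] else [] := by
  rw [List.filter_beq]
  split_ifs with hm
  · rw [List.count_eq_one_of_mem hnd hm]; rfl
  · rw [List.count_eq_zero_of_not_mem hm]; rfl

theorem get_logging_key_spec_aux (hyperparams : List (String × Int)) :
    get_logging_key hyperparams = get_logging_key_alt hyperparams := by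
  simp only [get_logging_key, get_logging_key_alt]
  have hnd : (PySem.Dict.ofList hyperparams).keys.Nodup := PySem.Dict.nodup_keys_ofList hyperparams
  set d := PySem.Dict.ofList hyperparams with hd
  congr 1
  -- unfold A's two loops into filter/map form
  rw [PySem.List.foldl_append_if (p := fun p : String × String => d.contains p.1)
      (f := fun p => PySem.Str.join "_" [p.2, PySem.Int.toStr (d.getD p.1 0)]),
    PySem.List.foldl_append_if (p := fun k : String => !(pvAbbrevDictA.contains k))
      (f := fun k => PySem.Str.join "_" [k, PySem.Int.toStr (d.getD k 0)])]
  simp only [List.nil_append]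
  -- unfold B's sort into the four buckets
  have hk : ∀ k : String, pvRankB.getD k 3 = 0 ∨ pvRankB.getD k 3 = 1 ∨ pvRankB.getD k 3 = 2 ∨
      pvRankB.getD k 3 = 3 := by
    intro k; rw [pv_rank_eq]; split_ifs <;> simp
  rw [pv_sorted_buckets _ hk d.keys]
  simp only [List.map_append]
  -- bucket i (i < 3) is the singleton of the i-th known key (if present)
  have hb0 : d.keys.filter (fun k => pvRankB.getD k 3 == 0) = d.keys.filter (fun k => k == "patch_size") := by
    apply List.filter_congr; intro k _; rw [pv_rank_eq]; split_ifs <;> simp_all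
  have hb1 : d.keys.filter (fun k => pvRankB.getD k 3 == 1) = d.keys.filter (fun k => k == "n_epochs") := by
    apply List.filter_congr; intro k _; rw [pv_rank_eq]; split_ifs <;> simp_all
  have hb2 : d.keys.filter (fun k => pvRankB.getD k 3 == 2) = d.keys.filter (fun k => k == "sample_size") := by
    apply List.filter_congr; intro k _; rw [pv_rank_eq]; split_ifs <;> simp_all
  have hb3 : d.keys.filter (fun k => pvRankB.getD k 3 == 3) = d.keys.filter (fun k => !(pvAbbrevDictA.contains k)) := by
    apply List.filter_congr; intro k _; rw [pv_rank_eq, pv_abbrevA_contains]; split_ifs <;> simp_all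
  rw [hb0, hb1, hb2, hb3,
    pv_filter_single _ hnd "patch_size", pv_filter_single _ hnd "n_epochs",
    pv_filter_single _ hnd "sample_size"]
  -- the unknown-key tails agree elementwise (label k = k there)
  have htail : (d.keys.filter (fun k => !(pvAbbrevDictA.contains k))).map
        (fun k => PySem.Str.join "_" [pvLabelsB.getD k k, PySem.Int.toStr (d.getD k 0)])
      = (d.keys.filter (fun k => !(pvAbbrevDictA.contains k))).map
        (fun k => PySem.Str.join "_" [k, PySem.Int.toStr (d.getD k 0)]) := by
    apply List.map_congr_left; intro k hkmem
    have := List.of_mem_filter hkmem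
    rw [pv_abbrevA_contains] at this
    have h1 : k ≠ "patch_size" := by intro h; subst h; simp at this
    have h2 : k ≠ "n_epochs" := by intro h; subst h; simp at this
    have h3 : k ≠ "sample_size" := by intro h; subst h; simp at this
    rw [pv_label_eq, if_neg h1, if_neg h2, if_neg h3]
  rw [htail]
  -- A's known-key pass over the 3-item literal dict
  have hitems : pvAbbrevDictA.items = [("patch_size", "patch"), ("n_epochs", "epochs"), ("sample_size", "sample")] := by
    decide
  rw [hitems]
  have hcm : ∀ k : String, d.contains k = decide (k ∈ d.keys) := fun k =>
    PySem.Dict.contains_eq_decide_mem_keys d k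
  by_cases hp : "patch_size" ∈ d.keys <;> by_cases he : "n_epochs" ∈ d.keys <;>
    by_cases hs : "sample_size" ∈ d.keys <;>
    simp [hcm, hp, he, hs, pv_label_eq]

-- ===== VERDICT (by name: the statement is the Claim_ definition above) =====
theorem get_logging_key_spec : Claim_equal_get_logging_key := by
  intro hyperparams _
  unfold Spec_get_logging_key
  exact get_logging_key_spec_aux hyperparams
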